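-- pv_equiv track=rewrite | github.com/SmartMaatt/first_NLP_script | manage_classes.py | sort_equal_values
-- ===== SOURCE A (Python) =====
-- def sort_equal_values(common_word_list, finish_index):
--     hanoi_value = None
--     hanoi_index = None
--     hanoi_list = []
--     for x in range(len(common_word_list)):
--         hanoi_value = common_word_list[x][1]
--         if x != (len(common_word_list)-1) and hanoi_value == common_word_list[x+1][1]:
--             if len(hanoi_list) == 0:
--                 hanoi_index = x
--                 hanoi_list.append(common_word_list[x])
--             hanoi_list.append(common_word_list[x+1])
--             continue
--         elif hanoi_index is not None:
--             hanoi_list.sort(key=lambda tup: tup[0], reverse=True)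
--             common_word_list[hanoi_index:hanoi_index+len(hanoi_list)] = hanoi_list
--             hanoi_value = None
--             hanoi_index = None
--             hanoi_list.clear()
--
--         if x >= finish_index-1:
--             break
--
--     return common_word_list[:finish_index]
-- ===== SOURCE B (Python) =====
-- def sort_equal_values(common_word_list, finish_index):
--     # Run-based rewrite: find each maximal run of equal second components,
--     # sort that slice descending by first component, stop after the run
--     # whose end index reaches finish_index-1.  Mutates common_word_list in
--     # place, like the original; the proved equivalence is about the return value.
--     n = len(common_word_list)
--     i = 0
--     while i < n:
--         j = i
--         while j + 1 < n and common_word_list[j + 1][1] == common_word_list[i][1]: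
--             j += 1
--         if j > i:
--             common_word_list[i:j + 1] = sorted(common_word_list[i:j + 1],
--                                                key=lambda t: t[0], reverse=True)
--         if j >= finish_index - 1:
--             break
--         i = j + 1
--     return common_word_list[:finish_index]
-- ===== Notes on version B (the rewrite author's own statement) =====
-- stated objective: alternative
-- what changed: Replaces A's one-pass state machine (hanoi_index/hanoi_list accumulator with continue/flush logic) by an explicit run decomposition: an inner scan finds the end of each maximal run of equal second components, the run's slice is sorted descending by first component and spliced back, and the outer loop breaks after the run whose end reaches finish_index-1.
import Mathlib
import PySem

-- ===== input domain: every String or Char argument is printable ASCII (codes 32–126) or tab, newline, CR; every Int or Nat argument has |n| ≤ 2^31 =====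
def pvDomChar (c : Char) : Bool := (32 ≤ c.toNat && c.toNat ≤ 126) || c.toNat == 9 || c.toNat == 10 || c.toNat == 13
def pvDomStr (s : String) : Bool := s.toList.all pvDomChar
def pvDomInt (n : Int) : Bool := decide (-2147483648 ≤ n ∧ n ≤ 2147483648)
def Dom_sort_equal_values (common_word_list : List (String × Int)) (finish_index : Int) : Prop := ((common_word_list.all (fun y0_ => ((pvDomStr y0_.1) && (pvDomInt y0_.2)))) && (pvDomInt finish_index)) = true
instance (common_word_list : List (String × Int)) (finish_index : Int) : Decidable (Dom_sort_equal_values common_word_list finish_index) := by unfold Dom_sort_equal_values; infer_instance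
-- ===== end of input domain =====

-- B re-implements A by an explicit run decomposition (find each maximal run of equal
-- second components, sort its slice descending by first component, early-stop after the
-- run covering finish_index-1); both Pythons mutate the list in place — the equivalence
-- proved here is about the return value. Objective: alternative decomposition.


-- default element for in-range list reads (Python indexing here is always in range)
def pvD : String × Int := ("", 0)

-- ===== PORT A =====
-- A's for-loop with break/continue, state: x, the (mutated) list, hanoi_index, hanoi_list.
-- The slice assignment lst[i:i+len] = hlist is ported by hand as take/drop (exact for the
-- in-range nonnegative i used here).
def aLoop (fi : Int) (n : Nat) (x : Nat) (lst : List (String × Int))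
    (hidx : Option Nat) (hlist : List (String × Int)) : List (String × Int) :=
  if x < n then
    if x ≠ n - 1 ∧ (lst.getD x pvD).2 = (lst.getD (x+1) pvD).2 then
      if hlist.length = 0 then
        aLoop fi n (x+1) lst (some x) (hlist ++ [lst.getD x pvD] ++ [lst.getD (x+1) pvD])
      else
        aLoop fi n (x+1) lst hidx (hlist ++ [lst.getD (x+1) pvD])
    else
      match hidx with
      | some i =>
          let lst' := lst.take i ++ PySem.List.sorted hlist (fun t => t.1) true
                        ++ lst.drop (i + hlist.length)
          if (x : Int) ≥ fi - 1 then lst' else aLoop fi n (x+1) lst' none []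
      | none =>
          if (x : Int) ≥ fi - 1 then lst else aLoop fi n (x+1) lst hidx hlist
  else lst
termination_by n - x

def sort_equal_values (common_word_list : List (String × Int)) (finish_index : Int) :
    List (String × Int) :=
  PySem.List.slice (aLoop finish_index common_word_list.length 0 common_word_list none [])
    none (some finish_index)

-- ===== PORT B =====
-- Source B's inner while: extend j while the next element's value equals the run value.
def bRun (lst : List (String × Int)) (n i j : Nat) : Nat :=
  if j + 1 < n ∧ (lst.getD (j+1) pvD).2 = (lst.getD i pvD).2 then bRun lst n i (j+1) else j
termination_by n - j

theorem bRun_ge (lst : List (String × Int)) (n i : Nat) : ∀ j, j ≤ bRun lst n i j := by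
  intro j
  induction j using bRun.induct (lst := lst) (n := n) (i := i) with
  | case1 j h ih => rw [bRun, if_pos h]; omega
  | case2 j h => rw [bRun, if_neg h]

-- Source B's outer while with early break; the slice read lst[i:j+1] is PySem.List.slice.
def bLoop (fi : Int) (n : Nat) (i : Nat) (lst : List (String × Int)) : List (String × Int) :=
  if i < n then
    let j := bRun lst n i i
    let lst' :=
      if i < j then
        lst.take i ++ PySem.List.sorted (PySem.List.slice lst (some (i : Int)) (some ((j : Int) + 1)))
                        (fun t => t.1) true ++ lst.drop (j+1)
      else lst
    if (j : Int) ≥ fi - 1 then lst' else bLoop fi n (j+1) lst'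
  else lst
termination_by n - i
decreasing_by have := bRun_ge lst n i i; omega

def sort_equal_values_alt (common_word_list : List (String × Int)) (finish_index : Int) :
    List (String × Int) :=
  PySem.List.slice (bLoop finish_index common_word_list.length 0 common_word_list)
    none (some finish_index)

-- ===== PRECONDITION & SPEC =====
def Spec_sort_equal_values (common_word_list : List (String × Int)) (finish_index : Int) (out : List (String × Int)) : Prop := out = sort_equal_values_alt common_word_list finish_index
instance (common_word_list : List (String × Int)) (finish_index : Int) (out : List (String × Int)) : Decidable (Spec_sort_equal_values common_word_list finish_index out) := by unfold Spec_sort_equal_values; infer_instance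

-- ===== CLAIM (what is proved, stated in full; the proofs are below) =====
def Claim_equal_sort_equal_values : Prop := ∀ (common_word_list : List (String × Int)) (finish_index : Int), Dom_sort_equal_values common_word_list finish_index → Spec_sort_equal_values common_word_list finish_index (sort_equal_values common_word_list finish_index)

-- ===== LEMMAS AND PROOFS =====

theorem bRun_lt (lst : List (String × Int)) (n i : Nat) :
    ∀ j, j < n → bRun lst n i j < n := by
  intro j
  induction j using bRun.induct (lst := lst) (n := n) (i := i) with
  | case1 j h ih => intro _; rw [bRun, if_pos h]; exact ih (by omega)
  | case2 j h => intro hj; rw [bRun, if_neg h]; exact hj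

theorem bRun_stop (lst : List (String × Int)) (n i : Nat) :
    ∀ j, ¬(bRun lst n i j + 1 < n ∧ (lst.getD (bRun lst n i j + 1) pvD).2 = (lst.getD i pvD).2) := by
  intro j
  induction j using bRun.induct (lst := lst) (n := n) (i := i) with
  | case1 j h ih => rw [bRun, if_pos h]; exact ih
  | case2 j h => rw [bRun, if_neg h]; exact h

theorem bRun_eqval (lst : List (String × Int)) (n i : Nat) :
    ∀ j, (lst.getD j pvD).2 = (lst.getD i pvD).2 →
      ∀ k, j ≤ k → k ≤ bRun lst n i j → (lst.getD k pvD).2 = (lst.getD i pvD).2 := by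
  intro j
  induction j using bRun.induct (lst := lst) (n := n) (i := i) with
  | case1 j h ih =>
      intro hv k hk1 hk2
      rw [bRun, if_pos h] at hk2
      rcases Nat.eq_or_lt_of_le hk1 with rfl | hlt
      · exact hv
      · exact ih h.2 k (by omega) hk2
  | case2 j h =>
      intro hv k hk1 hk2
      rw [bRun, if_neg h] at hk2
      have : k = j := by omega
      subst this; exact hv

theorem bRun_gt_step (lst : List (String × Int)) (n i j : Nat) (h : j < bRun lst n i j) :
    j + 1 < n ∧ (lst.getD (j+1) pvD).2 = (lst.getD i pvD).2 := by
  by_cases hc : j + 1 < n ∧ (lst.getD (j+1) pvD).2 = (lst.getD i pvD).2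
  · exact hc
  · rw [bRun, if_neg hc] at h; omega

theorem seg_single {α : Type} (lst : List α) (d : α) (x : Nat) (h : x < lst.length) :
    (lst.drop x).take (x + 1 - x) = [lst.getD x d] := by
  have h1 : x + 1 - x = 1 := by omega
  rw [h1, List.take_add_one, List.take_zero, List.getElem?_drop]
  simp [List.getD, List.getElem?_eq_getElem h]

theorem seg_append {α : Type} (lst : List α) (d : α) (x y : Nat) (hxy : x ≤ y)
    (h : y + 1 < lst.length) :
    (lst.drop x).take (y + 1 - x) ++ [lst.getD (y+1) d] = (lst.drop x).take (y + 2 - x) := by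
  have h2 : y + 2 - x = (y + 1 - x) + 1 := by omega
  rw [h2, List.take_add_one, List.getElem?_drop]
  have hx : x + (y + 1 - x) = y + 1 := by omega
  rw [hx, List.getElem?_eq_getElem h]
  simp [List.getD, List.getElem?_eq_getElem h]

theorem aLoop_run (fi : Int) (lst : List (String × Int)) (n x j : Nat)
    (hn : n = lst.length) (hx : x < n) (hj : j < n)
    (hxj : x < j)
    (heq : ∀ k, x ≤ k → k ≤ j → (lst.getD k pvD).2 = (lst.getD x pvD).2)
    (hstop : ¬(j + 1 < n ∧ (lst.getD (j+1) pvD).2 = (lst.getD x pvD).2)) :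
    ∀ d y, j - y ≤ d → x < y → y ≤ j →
    aLoop fi n y lst (some x) ((lst.drop x).take (y+1-x)) =
      (if (j:Int) ≥ fi - 1 then
         lst.take x ++ PySem.List.sorted ((lst.drop x).take (j+1-x)) (fun t => t.1) true
           ++ lst.drop (j+1)
       else aLoop fi n (j+1)
         (lst.take x ++ PySem.List.sorted ((lst.drop x).take (j+1-x)) (fun t => t.1) true
           ++ lst.drop (j+1)) none []) := by
  have hbase : aLoop fi n j lst (some x) ((lst.drop x).take (j+1-x)) =
      (if (j:Int) ≥ fi - 1 then
         lst.take x ++ PySem.List.sorted ((lst.drop x).take (j+1-x)) (fun t => t.1) true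
           ++ lst.drop (j+1)
       else aLoop fi n (j+1)
         (lst.take x ++ PySem.List.sorted ((lst.drop x).take (j+1-x)) (fun t => t.1) true
           ++ lst.drop (j+1)) none []) := by
    rw [aLoop, if_pos hj]
    have hcond : ¬(j ≠ n - 1 ∧ (lst.getD j pvD).2 = (lst.getD (j+1) pvD).2) := by
      rcases Nat.lt_or_ge (j+1) n with h1 | h1
      · rintro ⟨_, h2⟩
        exact hstop ⟨h1, h2 ▸ heq j (by omega) (by omega)⟩
      · rintro ⟨h2, _⟩; omega
    rw [if_neg hcond]
    have hlen : ((lst.drop x).take (j+1-x)).length = j+1-x := by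
      simp; omega
    simp only [hlen]
    have hxj : x + (j + 1 - x) = j + 1 := by omega
    rw [hxj]
  intro d
  induction d with
  | zero =>
      intro y hd hxy hyj
      have : y = j := by omega
      subst this; exact hbase
  | succ e ih =>
      intro y hd hxy hyj
      rcases Nat.eq_or_lt_of_le hyj with rfl | hlt
      · exact hbase
      · rw [aLoop, if_pos (by omega : y < n)]
        have hcondT : y ≠ n - 1 ∧ (lst.getD y pvD).2 = (lst.getD (y+1) pvD).2 :=
          ⟨by omega, (heq y (by omega) (by omega)).trans (heq (y+1) (by omega) (by omega)).symm⟩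
        rw [if_pos hcondT]
        have hlen0 : ¬(((lst.drop x).take (y+1-x)).length = 0) := by
          simp; omega
        rw [if_neg hlen0]
        rw [seg_append lst pvD x y (by omega) (by omega)]
        have h3 : y + 2 - x = (y + 1) + 1 - x := by omega
        rw [h3]
        exact ih (y+1) (by omega) (by omega) (by omega)

theorem splice_length (lst : List (String × Int)) (x j : Nat) (hx : x ≤ j)
    (hj : j < lst.length) :
    (lst.take x ++ PySem.List.sorted ((lst.drop x).take (j+1-x)) (fun t => t.1) true
      ++ lst.drop (j+1)).length = lst.length := by
  simp [PySem.List.length_sorted]; omega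

theorem aLoop_eq_bLoop (fi : Int) (n : Nat) :
    ∀ x lst, n = lst.length → aLoop fi n x lst none [] = bLoop fi n x lst := by
  have key : ∀ d x lst, n - x ≤ d → n = lst.length →
      aLoop fi n x lst none [] = bLoop fi n x lst := by
    intro d
    induction d with
    | zero =>
        intro x lst hd hn
        rw [aLoop, if_neg (by omega : ¬ x < n), bLoop, if_neg (by omega : ¬ x < n)]
    | succ e ih =>
        intro x lst hd hn
        by_cases hx : x < n
        · have hjge : x ≤ bRun lst n x x := bRun_ge lst n x x
          have hjlt : bRun lst n x x < n := bRun_lt lst n x x hx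
          have hstop := bRun_stop lst n x x
          rw [bLoop, if_pos hx]
          dsimp only
          rcases Nat.eq_or_lt_of_le hjge with hje | hjgt
          · -- singleton run: bRun lst n x x = x
            rw [aLoop, if_pos hx]
            have hcondF : ¬(x ≠ n - 1 ∧ (lst.getD x pvD).2 = (lst.getD (x+1) pvD).2) := by
              rw [← hje] at hstop
              rcases Nat.lt_or_ge (x+1) n with h1 | h1
              · rintro ⟨_, h2⟩; exact hstop ⟨h1, h2.symm⟩
              · rintro ⟨h2, _⟩; omega
            rw [if_neg hcondF]
            rw [← hje]
            rw [if_neg (by omega : ¬ x < x)]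
            by_cases hbr : (x:Int) ≥ fi - 1
            · rw [if_pos hbr, if_pos hbr]
            · rw [if_neg hbr, if_neg hbr]
              exact ih (x+1) lst (by omega) hn
          · -- proper run x < j
            have hstep := bRun_gt_step lst n x x hjgt
            have heq := bRun_eqval lst n x x rfl
            rw [aLoop, if_pos hx]
            have hcondT : x ≠ n - 1 ∧ (lst.getD x pvD).2 = (lst.getD (x+1) pvD).2 :=
              ⟨by omega, hstep.2.symm⟩
            rw [if_pos hcondT]
            rw [if_pos (by simp : (List.length ([] : List (String × Int)) = 0))]
            have h2 : ([] : List (String × Int)) ++ [lst.getD x pvD] ++ [lst.getD (x+1) pvD]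
                = (lst.drop x).take ((x+1)+1-x) := by
              have hs := seg_single lst pvD x (by omega)
              have ha := seg_append lst pvD x x (Nat.le_refl x) (by omega)
              rw [hs] at ha
              have : x + 2 - x = (x+1)+1-x := by omega
              rw [this] at ha
              simpa using ha
            rw [h2]
            rw [aLoop_run fi lst n x (bRun lst n x x) hn hx hjlt hjgt heq hstop
              (bRun lst n x x - (x+1)) (x+1) (by omega) (by omega) (by omega)]
            rw [if_pos hjgt]
            have hslice : PySem.List.slice lst (some (x : Int)) (some ((bRun lst n x x : Int) + 1))
                = (lst.drop x).take (bRun lst n x x + 1 - x) := by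
              have : ((bRun lst n x x : Int) + 1) = ((bRun lst n x x + 1 : Nat) : Int) := by push_cast; ring
              rw [this, PySem.List.slice_natCast]
            rw [hslice]
            by_cases hbr : ((bRun lst n x x : Int)) ≥ fi - 1
            · rw [if_pos hbr, if_pos hbr]
            · rw [if_neg hbr, if_neg hbr]
              exact ih (bRun lst n x x + 1) _ (by omega)
                (by rw [splice_length lst x (bRun lst n x x) (by omega) (by omega)]; exact hn)
        · rw [aLoop, if_neg hx, bLoop, if_neg hx]
  intro x lst hn
  exact key (n - x) x lst (Nat.le_refl _) hn

-- ===== VERDICT (by name: the statement is the Claim_ definition above) =====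
theorem sort_equal_values_spec : Claim_equal_sort_equal_values := by
  intro lst fi _
  unfold Spec_sort_equal_values sort_equal_values sort_equal_values_alt
  rw [aLoop_eq_bLoop fi lst.length 0 lst rfl]
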